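-- pv_equiv track=rewrite | github.com/CoderHelm/coderhelm-platform | scripts/cleanup-duplicate-users.py | pick_keeper
-- ===== SOURCE A (Python) =====
-- def pick_keeper(records):
--     """Pick the record with the most useful data (has github_id preferred)."""
--     # Prefer record with github_id set
--     with_github = [r for r in records if r.get("github_id")]
--     if with_github:
--         return with_github[0]
--     # Prefer record with role=owner
--     owners = [r for r in records if r.get("role") == "owner"]
--     if owners:
--         return owners[0]
--     return records[0]
-- ===== SOURCE B (Python) =====
-- def pick_keeper(records):
--     """Pick the record with the most useful data (has github_id preferred)."""
--     first_owner = None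
--     for r in records:
--         if r.get("github_id"):
--             return r
--         if first_owner is None and r.get("role") == "owner":
--             first_owner = r
--     if first_owner is not None:
--         return first_owner
--     return records[0]
-- ===== Notes on version B (the rewrite author's own statement) =====
-- stated objective: simpler
-- what changed: Replaces the three passes (two filter comprehensions plus an indexed fallback) by a single early-exit loop that returns the first record with a truthy github_id immediately and remembers the first owner as it goes.
import Mathlib
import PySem

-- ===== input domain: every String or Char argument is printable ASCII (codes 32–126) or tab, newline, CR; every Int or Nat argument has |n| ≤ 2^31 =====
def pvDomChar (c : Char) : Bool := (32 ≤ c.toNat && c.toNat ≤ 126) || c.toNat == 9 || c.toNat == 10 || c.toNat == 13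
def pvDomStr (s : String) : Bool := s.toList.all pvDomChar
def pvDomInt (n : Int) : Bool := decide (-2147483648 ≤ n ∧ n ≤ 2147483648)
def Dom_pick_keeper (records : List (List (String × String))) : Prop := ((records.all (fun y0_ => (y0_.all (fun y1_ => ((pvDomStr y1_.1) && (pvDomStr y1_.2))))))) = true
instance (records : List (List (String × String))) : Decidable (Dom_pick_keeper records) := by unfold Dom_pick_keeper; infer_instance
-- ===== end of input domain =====

-- B replaces A's three passes (two filter comprehensions + indexed fallback) by a single
-- early-exit loop remembering the first owner; same return value on every non-empty input.


-- ===== PORT A =====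
-- r.get("github_id") truthy: key present with a non-empty value (first match in the assoc list = Python dict lookup)
def pkHasGithub (r : List (String × String)) : Bool := (r.lookup "github_id").getD "" ≠ ""
-- r.get("role") == "owner"
def pkIsOwner (r : List (String × String)) : Bool := r.lookup "role" == some "owner"

def pick_keeper (records : List (List (String × String))) : List (String × String) :=
  let with_github := records.filter pkHasGithub
  match with_github with
  | r :: _ => r
  | [] =>
    let owners := records.filter pkIsOwner
    match owners with
    | r :: _ => r
    | [] => records.headD []   -- records[0]; the empty list (IndexError) is excluded by Pre_

-- ===== PORT B =====
-- single loop: early return on truthy github_id, remember the first owner, fall back to records[0]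
def pkLoop (all : List (List (String × String))) :
    List (List (String × String)) → Option (List (String × String)) → List (String × String)
  | [], firstOwner =>
    match firstOwner with
    | some o => o
    | none => all.headD []     -- records[0]; empty input excluded by Pre_
  | r :: rs, firstOwner =>
    if pkHasGithub r then r
    else pkLoop all rs (if firstOwner.isNone && pkIsOwner r then some r else firstOwner)

def pick_keeper_alt (records : List (List (String × String))) : List (String × String) :=
  pkLoop records records none

-- ===== PRECONDITION & SPEC =====
-- Pre_ excludes the empty list, on which both A and B raise IndexError at records[0].
def Pre_pick_keeper (records : List (List (String × String))) : Prop := records ≠ []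
instance (records : List (List (String × String))) : Decidable (Pre_pick_keeper records) := by unfold Pre_pick_keeper; infer_instance
def pvWitness_pick_keeper : (List (List (String × String))) := [[("role", "owner")]]

def Spec_pick_keeper (records : List (List (String × String))) (out : List (String × String)) : Prop := out = pick_keeper_alt records
instance (records : List (List (String × String))) (out : List (String × String)) : Decidable (Spec_pick_keeper records out) := by unfold Spec_pick_keeper; infer_instance

-- ===== CLAIM (what is proved, stated in full; the proofs are below) =====
def Claim_equal_pick_keeper : Prop := ∀ (records : List (List (String × String))), Dom_pick_keeper records → Pre_pick_keeper records → Spec_pick_keeper records (pick_keeper records)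

-- ===== LEMMAS AND PROOFS =====

-- loop invariant: pkLoop returns the first github record of rs, else the saved firstOwner,
-- else the first owner of rs, else all[0]
theorem pkLoop_eq (all : List (List (String × String))) :
    ∀ (rs : List (List (String × String))) (fo : Option (List (String × String))),
    pkLoop all rs fo =
      match rs.filter pkHasGithub with
      | r :: _ => r
      | [] =>
        match fo with
        | some o => o
        | none =>
          match rs.filter pkIsOwner with
          | r :: _ => r
          | [] => all.headD [] := by
  intro rs
  induction rs with
  | nil => intro fo; cases fo <;> simp [pkLoop]
  | cons r rs ih =>
    intro fo
    by_cases hg : pkHasGithub r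
    · simp [pkLoop, hg]
    · simp only [pkLoop, hg, ih, List.filter_cons]
      simp only [Bool.false_eq_true, if_false]
      cases fo with
      | some o => simp
      | none =>
        by_cases ho : pkIsOwner r
        · cases h : rs.filter pkHasGithub with
          | nil => simp [ho]
          | cons a l => simp
        · simp [ho]

theorem pick_keeper_eq_alt (records : List (List (String × String))) :
    pick_keeper records = pick_keeper_alt records := by
  unfold pick_keeper pick_keeper_alt
  rw [pkLoop_eq]

-- ===== VERDICT (by name: the statement is the Claim_ definition above) =====
theorem pick_keeper_spec : Claim_equal_pick_keeper := by
  intro records _ _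
  unfold Spec_pick_keeper
  exact pick_keeper_eq_alt records
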